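-- pv_equiv track=rewrite | github.com/ncasetti7/RAMP | src/RAMP/utils/multiproc.py | batch_dicts
-- ===== SOURCE A (Python) =====
-- def batch_dicts(dicts, num_workers):
--     '''
--     Batch a list of dictionaries into a list of lists of dictionaries, and add a batch number to each dictionary
--
--     Args:
--         dicts (list): list of dictionaries
--         num_workers (int): number of workers
--
--     Returns:
--         batched_dicts (list): list of lists of dictionaries
--     '''
--     batch_size = int(len(dicts)/num_workers) + 1
--     batched_dicts = []
--     # Batch the dictionaries and add a batch number to each dictionary
--     for i in range(num_workers):
--         if (i+1)*batch_size > len(dicts):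
--             for d in dicts[i*batch_size:]:
--                 d['batch'] = i
--             batched_dicts.append(dicts[i*batch_size:])
--         else:
--             for d in dicts[i*batch_size:(i+1)*batch_size]:
--                 d['batch'] = i
--             batched_dicts.append(dicts[i*batch_size:(i+1)*batch_size])
--     # Remove any empty lists
--     batched_dicts = [x for x in batched_dicts if x != []]
--
--     return batched_dicts
-- ===== SOURCE B (Python) =====
-- def batch_dicts(dicts, num_workers):
--     '''
--     Batch a list of dictionaries into a list of lists of dictionaries, and add a batch number to each dictionary
--     (single pass with an accumulator: grow the current batch element by element, flushing it when full;
--     no per-worker slicing, no empty-list filtering)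
--     '''
--     batch_size = int(len(dicts)/num_workers) + 1
--     batched_dicts = []
--     current = []
--     for d in dicts:
--         if len(current) == batch_size:
--             batched_dicts.append(current)
--             current = []
--         d['batch'] = len(batched_dicts)
--         current.append(d)
--     if current:
--         batched_dicts.append(current)
--     return batched_dicts
-- ===== Notes on version B (the rewrite author's own statement) =====
-- stated objective: alternative
-- what changed: Replaces A's per-worker loop over slice windows (conditional bounds, each segment sliced twice, post-hoc filtering of empty batches) with a single element-by-element pass that grows the current batch in an accumulator, flushes it when it reaches batch_size, and tags each dict with the running batch count, so no slicing and no empty-batch filtering is needed.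
-- outside the precondition, e.g. on batch_dicts([{'a': 1}], -1): A returns [], B returns [[], [{'a': 1, 'batch': 1}]]
import Mathlib
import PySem

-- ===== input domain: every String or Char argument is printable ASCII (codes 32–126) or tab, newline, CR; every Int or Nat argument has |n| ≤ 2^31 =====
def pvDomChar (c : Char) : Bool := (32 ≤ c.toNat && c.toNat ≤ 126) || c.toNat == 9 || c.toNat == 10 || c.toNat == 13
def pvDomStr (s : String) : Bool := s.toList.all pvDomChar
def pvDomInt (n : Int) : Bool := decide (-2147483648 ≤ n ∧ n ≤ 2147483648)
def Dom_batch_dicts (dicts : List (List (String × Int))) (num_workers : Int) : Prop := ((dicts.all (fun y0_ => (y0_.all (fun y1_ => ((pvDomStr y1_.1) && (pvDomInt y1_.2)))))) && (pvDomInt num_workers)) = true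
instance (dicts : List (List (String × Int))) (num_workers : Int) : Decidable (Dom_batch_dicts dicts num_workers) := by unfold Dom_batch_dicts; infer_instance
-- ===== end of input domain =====

-- B replaces A's per-worker slicing loop with one element-by-element pass that grows the current batch in
-- an accumulator, flushes it when it reaches batch_size, and tags each dict with the running batch count
-- (objective: alternative).  Both A and B mutate the dict objects in place (adding the 'batch' key); the
-- mutation is identical, and the equivalence proved here is about the return value, modelled by threading
-- the updated dicts through the computation.

-- ===== PORT A =====
-- d['batch'] = i on a dict: overwrite in place if the key exists (keeping its position), else append.
def pvSetBatch (d : List (String × Int)) (i : Int) : List (String × Int) :=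
  if d.any (fun p => p.1 == "batch") then
    d.map (fun p => if p.1 == "batch" then ("batch", i) else p)
  else d ++ [("batch", i)]

-- "for d in dicts[lo:hi]: d['batch'] = i" — the dicts are aliased, so this updates, in place, exactly the
-- positions the (clamped, as in Python) slice [lo:hi] covers.
def pvMarkSlice (ds : List (List (String × Int))) (lo hi : Int) (i : Int) : List (List (String × Int)) :=
  ds.mapIdx (fun j d =>
    if PySem.List.clampIdx ds.length lo ≤ j ∧ j < PySem.List.clampIdx ds.length hi then pvSetBatch d i else d)

-- the body of A's "for i in range(num_workers)" loop; state = (dicts as mutated so far, batched_dicts)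
def pvStepA (bs : Int)
    (st : List (List (String × Int)) × List (List (List (String × Int)))) (i : Int) :
    List (List (String × Int)) × List (List (List (String × Int))) :=
  let ds := st.1
  let acc := st.2
  if (i + 1) * bs > (ds.length : Int) then
    let ds' := pvMarkSlice ds (i * bs) (ds.length : Int) i
    (ds', acc ++ [PySem.List.slice ds' (some (i * bs)) none])
  else
    let ds' := pvMarkSlice ds (i * bs) ((i + 1) * bs) i
    (ds', acc ++ [PySem.List.slice ds' (some (i * bs)) (some ((i + 1) * bs))])

def batch_dicts (dicts : List (List (String × Int))) (num_workers : Int) : List (List (List (String × Int))) :=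
  -- int(len(dicts)/num_workers): float division then truncation; exact floor division for the
  -- positive num_workers admitted by Pre_ (len(dicts) ≥ 0).
  let bs := PySem.Int.floordiv (dicts.length : Int) num_workers + 1
  (((PySem.List.pyRange 0 num_workers 1).foldl (pvStepA bs) (dicts, [])).2).filter
    (fun x => decide (x ≠ []))

-- ===== PORT B =====
-- the body of B's "for d in dicts" loop; state = (batched_dicts, current)
def pvStepB (bs : Int)
    (st : List (List (List (String × Int))) × List (List (String × Int)))
    (d : List (String × Int)) :
    List (List (List (String × Int))) × List (List (String × Int)) :=
  -- if len(current) == batch_size: batched_dicts.append(current); current = []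
  let p := if (st.2.length : Int) = bs then (st.1 ++ [st.2], ([] : List (List (String × Int)))) else st
  -- d['batch'] = len(batched_dicts); current.append(d)
  (p.1, p.2 ++ [pvSetBatch d (p.1.length : Int)])

def batch_dicts_alt (dicts : List (List (String × Int))) (num_workers : Int) : List (List (List (String × Int))) :=
  let bs := PySem.Int.floordiv (dicts.length : Int) num_workers + 1
  let st := dicts.foldl (pvStepB bs) ([], [])
  if st.2 ≠ [] then st.1 ++ [st.2] else st.1

-- ===== PRECONDITION & SPEC =====
-- Pre_ excludes num_workers = 0 (A raises ZeroDivisionError) and negative num_workers, a nonsensical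
-- worker count outside the task's natural domain (A happens to return [] there; B's accumulator pass
-- returns the dicts in batches there since the computed batch size is not positive).
def Pre_batch_dicts (dicts : List (List (String × Int))) (num_workers : Int) : Prop := 1 ≤ num_workers
instance (dicts : List (List (String × Int))) (num_workers : Int) : Decidable (Pre_batch_dicts dicts num_workers) := by unfold Pre_batch_dicts; infer_instance

def pvWitness_batch_dicts : (List (List (String × Int))) × Int := ([[("a", 1)], [("b", 2)], []], 2)

def Spec_batch_dicts (dicts : List (List (String × Int))) (num_workers : Int) (out : List (List (List (String × Int)))) : Prop := out = batch_dicts_alt dicts num_workers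
instance (dicts : List (List (String × Int))) (num_workers : Int) (out : List (List (List (String × Int)))) : Decidable (Spec_batch_dicts dicts num_workers out) := by unfold Spec_batch_dicts; infer_instance

-- ===== CLAIM (what is proved, stated in full; the proofs are below) =====
def Claim_equal_batch_dicts : Prop := ∀ (dicts : List (List (String × Int))) (num_workers : Int), Dom_batch_dicts dicts num_workers → Pre_batch_dicts dicts num_workers → Spec_batch_dicts dicts num_workers (batch_dicts dicts num_workers)

-- ===== LEMMAS AND PROOFS =====

-- dicts with every position j < m tagged with batch number j / bsN (the state of the aliased dict list
-- after the first ⌈m / bsN⌉ of A's loop iterations; at m = length, also the dicts as B has tagged them).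
def pvTag (dicts : List (List (String × Int))) (bsN m : Nat) : List (List (String × Int)) :=
  dicts.mapIdx (fun j d => if j < m then pvSetBatch d ((j / bsN : Nat) : Int) else d)

lemma pvTag_length (dicts : List (List (String × Int))) (bsN m : Nat) :
    (pvTag dicts bsN m).length = dicts.length := by
  simp [pvTag]

lemma pvTag_zero (dicts : List (List (String × Int))) (bsN : Nat) :
    pvTag dicts bsN 0 = dicts := by
  apply List.ext_getElem (by simp [pvTag])
  intro j h1 h2
  simp [pvTag]

-- number of nonempty batches: ⌈n / bsN⌉
def pvM (n bsN : Nat) : Nat := if 0 < n then (n + bsN - 1) / bsN else 0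

lemma pvM_iff (n bsN : Nat) (hbs : 0 < bsN) (i : Nat) : i < pvM n bsN ↔ i * bsN < n := by
  unfold pvM
  by_cases hn : 0 < n
  · rw [if_pos hn]
    have h1 : i < (n + bsN - 1) / bsN ↔ i + 1 ≤ (n + bsN - 1) / bsN := Iff.rfl
    rw [h1, Nat.le_div_iff_mul_le hbs, add_mul, one_mul]
    generalize i * bsN = t
    omega
  · rw [if_neg hn]
    constructor
    · omega
    · intro h; omega

-- the window [a*bsN, (a+1)*bsN) of the tagged list does not depend on how far (≥ the window) tagging has gone
lemma pvTag_window (dicts : List (List (String × Int))) (bsN a m1 m2 : Nat)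
    (h1 : min ((a + 1) * bsN) dicts.length ≤ m1) (h2 : min ((a + 1) * bsN) dicts.length ≤ m2) :
    ((pvTag dicts bsN m1).drop (a * bsN)).take bsN = ((pvTag dicts bsN m2).drop (a * bsN)).take bsN := by
  have hexp : (a + 1) * bsN = a * bsN + bsN := by ring
  rw [hexp] at h1 h2
  apply List.ext_getElem (by simp [pvTag])
  intro k hk1 hk2
  have hb : k < bsN ∧ a * bsN + k < dicts.length := by
    simp [pvTag] at hk1
    omega
  have hj1 : a * bsN + k < m1 := by omega
  have hj2 : a * bsN + k < m2 := by omega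
  simp [List.getElem_take, List.getElem_drop, pvTag, hj1, hj2]

-- the mark pass of one of A's iterations extends the tagged prefix to min((a+1)*bsN, n)
lemma pvMarkSlice_eq (dicts : List (List (String × Int))) (bsN a : Nat) (lo hi : Int)
    (hlo : PySem.List.clampIdx dicts.length lo = min (a * bsN) dicts.length)
    (hhi : PySem.List.clampIdx dicts.length hi = min ((a + 1) * bsN) dicts.length) :
    pvMarkSlice (pvTag dicts bsN (min (a * bsN) dicts.length)) lo hi ((a : Nat) : Int) =
      pvTag dicts bsN (min ((a + 1) * bsN) dicts.length) := by
  have hexp : (a + 1) * bsN = a * bsN + bsN := by ring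
  apply List.ext_getElem (by simp [pvMarkSlice, pvTag])
  intro j h1 h2
  have hj : j < dicts.length := by simpa [pvMarkSlice, pvTag] using h1
  simp only [pvMarkSlice, pvTag, List.getElem_mapIdx, List.length_mapIdx, hlo, hhi]
  by_cases hreg : min (a * bsN) dicts.length ≤ j ∧ j < min ((a + 1) * bsN) dicts.length
  · rw [if_pos hreg]
    have hj1 : ¬ j < min (a * bsN) dicts.length := by omega
    have hj2 : j < min ((a + 1) * bsN) dicts.length := hreg.2
    rw [if_neg hj1, if_pos hj2]
    have hdiv : j / bsN = a := by
      apply Nat.div_eq_of_lt_le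
      · omega
      · omega
    rw [hdiv]
  · rw [if_neg hreg]
    by_cases hj1 : j < min (a * bsN) dicts.length
    · rw [if_pos hj1, if_pos (by omega)]
    · rw [if_neg hj1, if_neg (by omega)]

-- one iteration of A's loop advances the tagged prefix by one batch and appends that batch
lemma pvStepA_eq (dicts : List (List (String × Int))) (bsN a : Nat)
    (acc : List (List (List (String × Int)))) :
    pvStepA ((bsN : Nat) : Int) (pvTag dicts bsN (min (a * bsN) dicts.length), acc) ((a : Nat) : Int) =
      (pvTag dicts bsN (min ((a + 1) * bsN) dicts.length),
        acc ++ [((pvTag dicts bsN dicts.length).drop (a * bsN)).take bsN]) := by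
  have hexp : (a + 1) * bsN = a * bsN + bsN := by ring
  have hlen : (pvTag dicts bsN (min (a * bsN) dicts.length)).length = dicts.length := pvTag_length ..
  have hc1 : ((a : Int) + 1) * (bsN : Int) = (((a + 1) * bsN : Nat) : Int) := by push_cast; ring
  have hc2 : (a : Int) * (bsN : Int) = ((a * bsN : Nat) : Int) := by push_cast; ring
  unfold pvStepA
  simp only [hlen, hc1, hc2]
  by_cases hc : dicts.length < (a + 1) * bsN
  · rw [if_pos (by exact_mod_cast hc)]
    have hmin : min ((a + 1) * bsN) dicts.length = dicts.length := by omega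
    have hmark : pvMarkSlice (pvTag dicts bsN (min (a * bsN) dicts.length)) ((a * bsN : Nat) : Int)
        ((dicts.length : Nat) : Int) ((a : Nat) : Int) = pvTag dicts bsN (min ((a + 1) * bsN) dicts.length) := by
      apply pvMarkSlice_eq
      · rw [PySem.List.clampIdx_natCast]
      · rw [PySem.List.clampIdx_natCast]; omega
    rw [hmark]
    refine Prod.ext rfl ?_
    simp only
    congr 1
    rw [PySem.List.slice_some_none, pvTag_length, PySem.List.clampIdx_natCast, hmin]
    rcases Nat.lt_or_ge dicts.length (a * bsN) with hlt | hle
    · rw [min_eq_right (by omega)]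
      rw [List.drop_eq_nil_of_le (by simp [pvTag]),
        List.drop_eq_nil_of_le (by simp [pvTag]; omega), List.take_nil]
    · rw [min_eq_left hle]
      rw [List.take_of_length_le (by simp [pvTag]; omega)]
  · rw [if_neg (by exact_mod_cast hc)]
    have hmark : pvMarkSlice (pvTag dicts bsN (min (a * bsN) dicts.length)) ((a * bsN : Nat) : Int)
        (((a + 1) * bsN : Nat) : Int) ((a : Nat) : Int) = pvTag dicts bsN (min ((a + 1) * bsN) dicts.length) := by
      apply pvMarkSlice_eq
      · rw [PySem.List.clampIdx_natCast]
      · rw [PySem.List.clampIdx_natCast]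
    rw [hmark]
    refine Prod.ext rfl ?_
    simp only
    congr 1
    have hsum : (((a + 1) * bsN : Nat) : Int) = ((a * bsN : Nat) : Int) + ((bsN : Nat) : Int) := by
      push_cast; ring
    rw [hsum, PySem.List.slice_natCast_add]
    congr 1
    exact pvTag_window dicts bsN a (min ((a + 1) * bsN) dicts.length) dicts.length (le_refl _)
      (by omega)

lemma pvFoldA (dicts : List (List (String × Int))) (bsN : Nat) (hbs : 0 < bsN) :
    ∀ (k a : Nat) (acc : List (List (List (String × Int)))),
      (PySem.List.pyRange (a : Int) ((a : Int) + (k : Int)) 1).foldl (pvStepA ((bsN : Nat) : Int))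
          (pvTag dicts bsN (min (a * bsN) dicts.length), acc) =
        (pvTag dicts bsN (min ((a + k) * bsN) dicts.length),
          acc ++ (List.range k).map
            (fun t => ((pvTag dicts bsN dicts.length).drop ((a + t) * bsN)).take bsN)) := by
  intro k
  induction k with
  | zero =>
      intro a acc
      rw [PySem.List.pyRange_one_eq_nil (by omega)]
      simp
  | succ k ih =>
      intro a acc
      rw [PySem.List.pyRange_one_cons (by push_cast; omega)]
      simp only [List.foldl_cons]
      rw [pvStepA_eq dicts bsN a acc]
      have hcast : ((a : Int) + 1) = (((a + 1 : Nat)) : Int) := by push_cast; ring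
      have hcast2 : ((a : Int) + ((k + 1 : Nat) : Int)) = (((a + 1 : Nat)) : Int) + (k : Int) := by push_cast; ring
      rw [hcast, hcast2, ih (a + 1)]
      rw [show a + 1 + k = a + (k + 1) from by omega]
      refine Prod.ext rfl ?_
      simp only [List.range_succ_eq_map, List.map_cons, List.map_map, List.append_assoc,
        List.singleton_append, Nat.add_zero]
      congr 1
      congr 1
      apply List.map_congr_left
      intro t _
      simp only [Function.comp]
      rw [show a + 1 + t = a + Nat.succ t from by omega]

-- appending the next element to a drop-take window
lemma pvDropTakeSucc {α : Type} (l : List α) (a c : Nat) (h : a + c < l.length) :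
    (l.drop a).take (c + 1) = (l.drop a).take c ++ [l[a + c]] := by
  rw [List.take_succ]
  congr 1
  rw [List.getElem?_drop, List.getElem?_eq_getElem h]
  rfl

lemma pvTag_getElem (dicts : List (List (String × Int))) (bsN : Nat) (j : Nat)
    (h : j < (pvTag dicts bsN dicts.length).length) :
    (pvTag dicts bsN dicts.length)[j] =
      pvSetBatch (dicts[j]'(by simpa [pvTag_length] using h)) ((j / bsN : Nat) : Int) := by
  have hj : j < dicts.length := by simpa [pvTag_length] using h
  simp [pvTag, hj]

-- invariant of B's single pass: after j elements, batched_dicts holds the full batches seen so far and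
-- current the (possibly full, not yet flushed) window of the last batch
lemma pvFoldB (dicts : List (List (String × Int))) (bsN : Nat) (hbs : 0 < bsN) :
    ∀ j, j ≤ dicts.length →
      (dicts.take j).foldl (pvStepB ((bsN : Nat) : Int)) ([], []) =
        ((List.range ((j - 1) / bsN)).map
            (fun i => ((pvTag dicts bsN dicts.length).drop (i * bsN)).take bsN),
          ((pvTag dicts bsN dicts.length).drop (((j - 1) / bsN) * bsN)).take (j - ((j - 1) / bsN) * bsN)) := by
  intro j
  induction j with
  | zero => intro _; simp
  | succ j ih =>
      intro hj1
      have hjlt : j < dicts.length := by omega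
      rw [List.take_succ, List.getElem?_eq_getElem hjlt]
      show (dicts.take j ++ [dicts[j]]).foldl (pvStepB ((bsN : Nat) : Int)) ([], []) = _
      rw [List.foldl_append, ih (by omega)]
      set l := pvTag dicts bsN dicts.length with hl
      have hlen : l.length = dicts.length := pvTag_length ..
      set q := (j - 1) / bsN with hq
      have hA1 : q * bsN ≤ j := by
        rw [hq]
        have := Nat.div_mul_le_self (j - 1) bsN
        omega
      have hA2 : j ≤ q * bsN + bsN := by
        rw [hq]
        have hdm := Nat.div_add_mod (j - 1) bsN
        rw [Nat.mul_comm] at hdm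
        have hmod := Nat.mod_lt (j - 1) hbs
        omega
      set cl := j - q * bsN with hcl
      have hcllen : ((l.drop (q * bsN)).take cl).length = cl := by
        simp only [List.length_take, List.length_drop, hlen]
        omega
      simp only [List.foldl_cons, List.foldl_nil, pvStepB, hcllen]
      by_cases hfl : cl = bsN
      · -- current is full: flush, then start the new batch with this element
        have hj0 : 0 < j := by omega
        have hjq : j = (q + 1) * bsN := by rw [add_mul, one_mul]; omega
        have hcond : ((cl : Nat) : Int) = ((bsN : Nat) : Int) := by exact_mod_cast hfl
        rw [if_pos hcond]
        have hdiv : j / bsN = q + 1 := by rw [hjq, Nat.mul_div_cancel _ hbs]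
        have hq' : (j + 1 - 1) / bsN = q + 1 := by rw [Nat.add_sub_cancel, hdiv]
        have hcur : (l.drop (q * bsN)).take cl = (l.drop (q * bsN)).take bsN := by rw [hfl]
        have htag : ((List.range q).map
            (fun i => (l.drop (i * bsN)).take bsN) ++ [(l.drop (q * bsN)).take cl]).length = q + 1 := by
          simp
        refine Prod.ext ?_ ?_
        · simp only [hq', List.range_succ, List.map_append, List.map_cons, List.map_nil]
          rw [hcur]
        · simp only [htag, hq']
          have hidx : (q + 1) * bsN + 0 < l.length := by
            rw [hlen]; omega
          have h1 : j + 1 - (q + 1) * bsN = 0 + 1 := by omega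
          rw [h1, pvDropTakeSucc l ((q + 1) * bsN) 0 hidx, List.take_zero, List.nil_append]
          rw [pvTag_getElem]
          have hj2 : (q + 1) * bsN + 0 = j := by omega
          simp [hj2, hdiv]
      · -- room in current: tag with the running batch number and append
        have hcllt : cl < bsN := by omega
        have hcond : ¬ ((cl : Nat) : Int) = ((bsN : Nat) : Int) := by
          intro h; exact hfl (by exact_mod_cast h)
        rw [if_neg hcond]
        have hdiv : j / bsN = q := by
          apply Nat.div_eq_of_lt_le
          · omega
          · rw [add_mul, one_mul]; omega
        have hq' : (j + 1 - 1) / bsN = q := by rw [Nat.add_sub_cancel, hdiv]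
        refine Prod.ext ?_ ?_
        · simp only [hq']
        · simp only [hq', List.length_map, List.length_range]
          have hidx : q * bsN + cl < l.length := by rw [hlen]; omega
          have h1 : j + 1 - q * bsN = cl + 1 := by omega
          rw [h1, pvDropTakeSucc l (q * bsN) cl hidx]
          rw [pvTag_getElem]
          have hj2 : q * bsN + cl = j := by omega
          simp [hj2, hdiv]

-- ===== VERDICT (by name: the statement is the Claim_ definition above) =====
theorem batch_dicts_spec : Claim_equal_batch_dicts := by
  intro dicts nw hdom hpre
  unfold Spec_batch_dicts
  have hw0 : (0 : Int) ≤ nw := by unfold Pre_batch_dicts at hpre; omega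
  set w := nw.toNat with hwdef
  have hw : ((w : Nat) : Int) = nw := Int.toNat_of_nonneg hw0
  have hw1 : 1 ≤ w := by unfold Pre_batch_dicts at hpre; omega
  set bsN := dicts.length / w + 1 with hbsdef
  have hbs : 0 < bsN := Nat.succ_pos _
  have hbsI : PySem.Int.floordiv ((dicts.length : Nat) : Int) nw + 1 = ((bsN : Nat) : Int) := by
    have h1 : PySem.Int.floordiv ((dicts.length : Nat) : Int) nw = ((dicts.length / w : Nat) : Int) := by
      rw [← hw]
      exact PySem.Int.floordiv_natCast dicts.length w
    rw [h1, hbsdef]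
    push_cast
    ring
  set M := pvM dicts.length bsN with hMdef
  -- A in normal form
  have hA : batch_dicts dicts nw =
      ((List.range w).map (fun i => ((pvTag dicts bsN dicts.length).drop (i * bsN)).take bsN)).filter
        (fun x => decide (x ≠ [])) := by
    show (((PySem.List.pyRange 0 nw 1).foldl
        (pvStepA (PySem.Int.floordiv ((dicts.length : Nat) : Int) nw + 1)) (dicts, [])).2).filter
          (fun x => decide (x ≠ [])) = _
    rw [hbsI, ← hw]
    have h0 : dicts = pvTag dicts bsN (min (0 * bsN) dicts.length) := by
      simp [pvTag_zero]
    conv_lhs => rw [h0]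
    have hfold := pvFoldA dicts bsN hbs w 0 []
    simp only [Nat.cast_zero, zero_add] at hfold
    rw [hfold]
    rfl
  -- the filter keeps exactly the first M chunks
  have hM_le : M ≤ w := by
    by_contra hlt
    have hwM : w * bsN < dicts.length := (pvM_iff dicts.length bsN hbs w).1 (by omega)
    have hdm := Nat.div_add_mod dicts.length w
    have hmod : dicts.length % w < w := Nat.mod_lt _ (by omega)
    have hexp : w * bsN = w * (dicts.length / w) + w := by rw [hbsdef]; ring
    omega
  have hfil : ((List.range w).map
        (fun i => ((pvTag dicts bsN dicts.length).drop (i * bsN)).take bsN)).filter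
          (fun x => decide (x ≠ [])) =
      (List.range M).map (fun i => ((pvTag dicts bsN dicts.length).drop (i * bsN)).take bsN) := by
    rw [show w = M + (w - M) by omega, List.range_add, List.map_append, List.filter_append]
    have hkeep : ((List.range M).map
        (fun i => ((pvTag dicts bsN dicts.length).drop (i * bsN)).take bsN)).filter
          (fun x => decide (x ≠ [])) =
        (List.range M).map (fun i => ((pvTag dicts bsN dicts.length).drop (i * bsN)).take bsN) := by
      rw [List.filter_eq_self]
      intro x hx
      simp only [List.mem_map, List.mem_range] at hx
      obtain ⟨i, hi, rfl⟩ := hx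
      have hlt : i * bsN < dicts.length := (pvM_iff dicts.length bsN hbs i).1 hi
      have hlen : (((pvTag dicts bsN dicts.length).drop (i * bsN)).take bsN).length =
          min bsN (dicts.length - i * bsN) := by
        simp [pvTag]
      have hne : ((pvTag dicts bsN dicts.length).drop (i * bsN)).take bsN ≠ [] := by
        intro hnil
        rw [hnil] at hlen
        simp at hlen
        omega
      simpa using hne
    have hdrop : (((List.range (w - M)).map (fun x => M + x)).map
        (fun i => ((pvTag dicts bsN dicts.length).drop (i * bsN)).take bsN)).filter
          (fun x => decide (x ≠ [])) = [] := by
      rw [List.filter_eq_nil_iff]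
      intro x hx
      simp only [List.mem_map, List.mem_range] at hx
      obtain ⟨i, ⟨t, ht, rfl⟩, rfl⟩ := hx
      have hge : ¬ M * bsN < dicts.length := fun h =>
        absurd ((pvM_iff dicts.length bsN hbs M).2 h) (by omega)
      have hge2 : dicts.length ≤ (M + t) * bsN := by
        have := Nat.mul_le_mul_right bsN (show M ≤ M + t by omega)
        omega
      have hnil : (pvTag dicts bsN dicts.length).drop ((M + t) * bsN) = [] :=
        List.drop_eq_nil_of_le (by simp [pvTag]; omega)
      simp [hnil]
    rw [hkeep, hdrop, List.append_nil]
  -- B in normal form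
  have hB : batch_dicts_alt dicts nw =
      (List.range M).map (fun i => ((pvTag dicts bsN dicts.length).drop (i * bsN)).take bsN) := by
    simp only [batch_dicts_alt]
    rw [hbsI]
    have hfold := pvFoldB dicts bsN hbs dicts.length (le_refl _)
    rw [List.take_length] at hfold
    rw [hfold]
    set l := pvTag dicts bsN dicts.length with hl
    have hlen : l.length = dicts.length := pvTag_length ..
    by_cases hn : 0 < dicts.length
    · set n := dicts.length with hn'
      set q := (n - 1) / bsN with hq
      have hA1 : q * bsN ≤ n - 1 := by rw [hq]; exact Nat.div_mul_le_self (n - 1) bsN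
      have hA2 : n ≤ q * bsN + bsN := by
        rw [hq]
        have hdm := Nat.div_add_mod (n - 1) bsN
        rw [Nat.mul_comm] at hdm
        have hmod := Nat.mod_lt (n - 1) hbs
        omega
      have hcllen : ((l.drop (q * bsN)).take (n - q * bsN)).length = n - q * bsN := by
        simp only [List.length_take, List.length_drop, hlen]
        omega
      have hcur_ne : (l.drop (q * bsN)).take (n - q * bsN) ≠ [] := by
        intro hnil
        rw [hnil] at hcllen
        simp at hcllen
        omega
      simp only [if_pos hcur_ne]
      have hcur : (l.drop (q * bsN)).take (n - q * bsN) = (l.drop (q * bsN)).take bsN := by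
        have hdlen : (l.drop (q * bsN)).length = n - q * bsN := by
          rw [List.length_drop, hlen]
        rw [List.take_of_length_le (by omega), List.take_of_length_le (by omega)]
      have hMq : M = q + 1 := by
        rw [hMdef]
        unfold pvM
        rw [if_pos hn]
        rw [show dicts.length + bsN - 1 = (dicts.length - 1) + bsN from by omega,
          Nat.add_div_right _ hbs]
      rw [hMq, List.range_succ, List.map_append, List.map_cons, List.map_nil, hcur]
    · have hn0 : dicts.length = 0 := by omega
      have hM0 : M = 0 := by rw [hMdef]; unfold pvM; rw [if_neg hn]
      simp [hn0, hM0]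
  rw [hA, hfil, hB]
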